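-- pv_equiv track=rewrite | github.com/budidino/AoC-python | 2020-d18.py | calc
-- ===== SOURCE A (Python) =====
-- def calc(n1, n2):
--   removedBrackets = False
--   brackets = n1[2]+n2[2]
--   while "(" in brackets and ")" in brackets:
--     brackets = brackets.replace("(", "", 1).replace(")", "", 1)
--     removedBrackets = True # might be called multiple times but who gives a damn :D
--
--   res = n1[0] + n2[0] if n1[1] == "+" else n1[0] * n2[0]
--   return (removedBrackets, (res, n2[1], brackets)) # res, 2nd opr, cleaned brackets
-- ===== SOURCE B (Python) =====
-- def calc(n1, n2):
--   brackets = n1[2] + n2[2]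
--   removed = min(brackets.count("("), brackets.count(")"))
--   removedBrackets = removed > 0
--   o = c = removed
--   cleaned = []
--   for ch in brackets:
--     if ch == "(" and o:
--       o -= 1
--     elif ch == ")" and c:
--       c -= 1
--     else:
--       cleaned.append(ch)
--   res = n1[0] + n2[0] if n1[1] == "+" else n1[0] * n2[0]
--   return (removedBrackets, (res, n2[1], "".join(cleaned)))
-- ===== Notes on version B (the rewrite author's own statement) =====
-- stated objective: simpler
-- what changed: A repeatedly rescans and rebuilds the whole brackets string (one replace-pair per loop iteration); B counts '(' and ')' once, takes removed = min of the counts, and deletes the first `removed` occurrences of each in a single pass.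
import Mathlib
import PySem

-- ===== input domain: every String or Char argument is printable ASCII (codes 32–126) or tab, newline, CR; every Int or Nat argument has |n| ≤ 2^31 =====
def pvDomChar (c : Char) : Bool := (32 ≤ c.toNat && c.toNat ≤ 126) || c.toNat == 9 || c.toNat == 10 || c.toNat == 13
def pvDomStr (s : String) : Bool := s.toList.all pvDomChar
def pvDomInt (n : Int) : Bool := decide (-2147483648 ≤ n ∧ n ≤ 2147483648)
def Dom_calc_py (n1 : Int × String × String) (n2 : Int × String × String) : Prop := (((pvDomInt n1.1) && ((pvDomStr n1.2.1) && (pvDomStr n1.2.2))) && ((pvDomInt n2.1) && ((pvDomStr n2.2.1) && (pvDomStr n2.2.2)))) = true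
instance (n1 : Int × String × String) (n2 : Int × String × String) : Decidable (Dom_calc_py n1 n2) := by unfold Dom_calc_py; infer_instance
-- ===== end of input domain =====

-- B replaces A's repeated whole-string replace() loop by one count + a single deleting pass (objective: simpler, one pass).

-- ===== PORT A =====
-- A's while loop: '("(" in brackets)' for a single-char needle is exactly char membership,
-- and '.replace("(", "", 1)' removes the first occurrence of that char — exactly List.erase.
def calcLoopA (removed : Bool) (bs : List Char) : Bool × List Char :=
  if h : '(' ∈ bs ∧ ')' ∈ bs then
    calcLoopA true ((bs.erase '(').erase ')')
  else (removed, bs)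
termination_by bs.length
decreasing_by
  calc ((bs.erase '(').erase ')').length ≤ (bs.erase '(').length := List.length_erase_le
    _ < bs.length := by
        have := List.length_erase_of_mem h.1
        have := List.length_pos_of_mem h.1
        omega

def calc_py (n1 : Int × String × String) (n2 : Int × String × String) : Bool × (Int × String × String) :=
  let p := calcLoopA false (n1.2.2.toList ++ n2.2.2.toList)
  let res : Int := if n1.2.1 == "+" then n1.1 + n2.1 else n1.1 * n2.1
  (p.1, (res, n2.2.1, String.ofList p.2))

-- ===== PORT B =====
-- one pass: delete the first o '(' and the first c ')' occurrences, keep everything else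
def cleanPass (o c : Nat) : List Char → List Char
  | [] => []
  | ch :: rest =>
    if ch = '(' ∧ o ≠ 0 then cleanPass (o - 1) c rest
    else if ch = ')' ∧ c ≠ 0 then cleanPass o (c - 1) rest
    else ch :: cleanPass o c rest

-- str.count of a single-char needle is exactly List.count
def calc_py_alt (n1 : Int × String × String) (n2 : Int × String × String) : Bool × (Int × String × String) :=
  let bs := n1.2.2.toList ++ n2.2.2.toList
  let removed := min (bs.count '(') (bs.count ')')
  let res : Int := if n1.2.1 == "+" then n1.1 + n2.1 else n1.1 * n2.1
  (decide (0 < removed), (res, n2.2.1, String.ofList (cleanPass removed removed bs)))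

-- ===== PRECONDITION & SPEC =====
def Spec_calc_py (n1 : Int × String × String) (n2 : Int × String × String) (out : Bool × (Int × String × String)) : Prop := out = calc_py_alt n1 n2
instance (n1 : Int × String × String) (n2 : Int × String × String) (out : Bool × (Int × String × String)) : Decidable (Spec_calc_py n1 n2 out) := by unfold Spec_calc_py; infer_instance

-- ===== CLAIM (what is proved, stated in full; the proofs are below) =====
def Claim_equal_calc_py : Prop := ∀ (n1 : Int × String × String) (n2 : Int × String × String), Dom_calc_py n1 n2 → Spec_calc_py n1 n2 (calc_py n1 n2)

-- ===== LEMMAS AND PROOFS =====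

theorem cleanPass_zero_zero (l : List Char) : cleanPass 0 0 l = l := by
  induction l with
  | nil => rfl
  | cons ch rest ih => simp [cleanPass, ih]

theorem cleanPass_erase_open (l : List Char) (h : '(' ∈ l) (o c : Nat) :
    cleanPass (o + 1) c l = cleanPass o c (l.erase '(') := by
  induction l generalizing c with
  | nil => cases h
  | cons ch rest ih =>
    by_cases hch : ch = '('
    · subst hch
      simp [cleanPass]
    · have hmem : '(' ∈ rest := by
        rcases List.mem_cons.mp h with h' | h'
        · exact absurd h'.symm hch
        · exact h'
      rw [List.erase_cons_tail (by simpa using hch)]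
      simp only [cleanPass, if_neg (show ¬(ch = '(' ∧ o + 1 ≠ 0) by simp [hch]),
        if_neg (show ¬(ch = '(' ∧ o ≠ 0) by simp [hch])]
      split_ifs with h2
      · exact ih hmem _
      · rw [ih hmem c]

theorem cleanPass_erase_close (l : List Char) (h : ')' ∈ l) (o c : Nat) :
    cleanPass o (c + 1) l = cleanPass o c (l.erase ')') := by
  induction l generalizing o with
  | nil => cases h
  | cons ch rest ih =>
    by_cases hch : ch = ')'
    · subst hch
      simp [cleanPass]
    · have hmem : ')' ∈ rest := by
        rcases List.mem_cons.mp h with h' | h'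
        · exact absurd h'.symm hch
        · exact h'
      rw [List.erase_cons_tail (by simpa using hch)]
      simp only [cleanPass, if_neg (show ¬(ch = ')' ∧ c + 1 ≠ 0) by simp [hch]),
        if_neg (show ¬(ch = ')' ∧ c ≠ 0) by simp [hch])]
      split_ifs with h1
      · exact ih hmem _
      · rw [ih hmem o]

theorem calcLoopA_eq (n : Nat) : ∀ (bs : List Char), bs.length ≤ n → ∀ r : Bool,
    calcLoopA r bs =
      (r || decide ('(' ∈ bs ∧ ')' ∈ bs),
       cleanPass (min (bs.count '(') (bs.count ')')) (min (bs.count '(') (bs.count ')')) bs) := by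
  induction n with
  | zero =>
    intro bs hlen r
    have : bs = [] := List.eq_nil_of_length_eq_zero (Nat.le_zero.mp hlen)
    subst this
    simp [calcLoopA, cleanPass]
  | succ n ih =>
    intro bs hlen r
    by_cases h : '(' ∈ bs ∧ ')' ∈ bs
    · obtain ⟨ho, hc⟩ := h
      have co_pos : 0 < bs.count '(' := List.count_pos_iff.mpr ho
      have cc_pos : 0 < bs.count ')' := List.count_pos_iff.mpr hc
      set bs' := (bs.erase '(').erase ')' with hbs'
      have hco' : (bs.erase '(').count '(' = bs.count '(' - 1 := List.count_erase_self
      have hcc1 : (bs.erase '(').count ')' = bs.count ')' := List.count_erase_of_ne (by decide)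
      have hcmem : ')' ∈ bs.erase '(' := List.count_pos_iff.mp (by omega)
      have hco'' : bs'.count '(' = bs.count '(' - 1 := by
        rw [hbs', List.count_erase_of_ne (by decide), hco']
      have hcc'' : bs'.count ')' = bs.count ')' - 1 := by
        rw [hbs', List.count_erase_self, hcc1]
      have hlen' : bs'.length ≤ n := by
        have h1 : (bs.erase '(').length = bs.length - 1 := List.length_erase_of_mem ho
        have h2 : bs'.length ≤ (bs.erase '(').length := List.length_erase_le
        have h3 : 0 < bs.length := List.length_pos_of_mem ho
        omega
      rw [calcLoopA, dif_pos ⟨ho, hc⟩, ih bs' hlen' true]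
      have hmin : min (bs.count '(') (bs.count ')')
          = min (bs'.count '(') (bs'.count ')') + 1 := by omega
      simp only [Prod.mk.injEq]
      refine ⟨?_, ?_⟩
      · simp [ho, hc]
      · rw [hmin, cleanPass_erase_open bs ho, cleanPass_erase_close _ hcmem]
    · rw [calcLoopA, dif_neg h]
      have hmin : min (bs.count '(') (bs.count ')') = 0 := by
        rcases not_and_or.mp h with h' | h'
        · have : bs.count '(' = 0 := by
            by_contra hne
            exact h' (List.count_pos_iff.mp (Nat.pos_of_ne_zero hne))
          omega
        · have : bs.count ')' = 0 := by
            by_contra hne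
            exact h' (List.count_pos_iff.mp (Nat.pos_of_ne_zero hne))
          omega
      simp [h, hmin, cleanPass_zero_zero]

-- ===== VERDICT (by name: the statement is the Claim_ definition above) =====
theorem calc_py_spec : Claim_equal_calc_py := by
  intro n1 n2 _
  unfold Spec_calc_py calc_py calc_py_alt
  set bs := n1.2.2.toList ++ n2.2.2.toList with hbs
  rw [calcLoopA_eq bs.length bs le_rfl false]
  have hpos : decide ('(' ∈ bs ∧ ')' ∈ bs)
      = decide (0 < min (bs.count '(') (bs.count ')')) := by
    simp [List.count_pos_iff]
  simp only [Bool.false_or, hpos]
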